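-- pv_equiv track=rewrite | github.com/Sandy4321/zenlib | src/zen/algorithms/community/community_common.py | normalize_communities
-- ===== SOURCE A (Python) =====
-- def normalize_communities(comm_table):
-- 	old_to_new_comms = {}
-- 	max_cidx = 0
-- 	community_sizes = []
--
-- 	for i in range(len(comm_table)):
-- 		cidx = comm_table[i]
-- 		if cidx in old_to_new_comms:
-- 			new_cidx = old_to_new_comms[cidx]
-- 			comm_table[i] = new_cidx
-- 			community_sizes[new_cidx] += 1
-- 		else:
-- 			old_to_new_comms[cidx] = max_cidx
-- 			comm_table[i] = max_cidx
-- 			community_sizes.append(1)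
-- 			max_cidx += 1
--
-- 	return community_sizes
-- ===== SOURCE B (Python) =====
-- def normalize_communities(comm_table):
-- 	# Alternative strategy: gather per-value statistics (first position and
-- 	# multiplicity) in one pass, derive the new labels by SORTING the distinct
-- 	# values by first position, then relabel through the rank dict.
-- 	first = {}
-- 	cnt = {}
-- 	for i, c in enumerate(comm_table):
-- 		if c not in first:
-- 			first[c] = i
-- 			cnt[c] = 0
-- 		cnt[c] += 1
-- 	order = sorted(cnt, key=first.get)
-- 	rank = {c: j for j, c in enumerate(order)}
-- 	comm_table[:] = [rank[c] for c in comm_table]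
-- 	return [cnt[c] for c in order]
-- ===== Notes on version B (the rewrite author's own statement) =====
-- stated objective: alternative
-- what changed: A assigns labels online in one fused loop (running max index, sizes incremented in place); B instead gathers per-value statistics (first position, multiplicity) in one pass, derives labels by sorting the distinct values by first position, relabels through a rank dict, and reads the sizes straight out of the multiplicity dict.
import Mathlib
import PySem

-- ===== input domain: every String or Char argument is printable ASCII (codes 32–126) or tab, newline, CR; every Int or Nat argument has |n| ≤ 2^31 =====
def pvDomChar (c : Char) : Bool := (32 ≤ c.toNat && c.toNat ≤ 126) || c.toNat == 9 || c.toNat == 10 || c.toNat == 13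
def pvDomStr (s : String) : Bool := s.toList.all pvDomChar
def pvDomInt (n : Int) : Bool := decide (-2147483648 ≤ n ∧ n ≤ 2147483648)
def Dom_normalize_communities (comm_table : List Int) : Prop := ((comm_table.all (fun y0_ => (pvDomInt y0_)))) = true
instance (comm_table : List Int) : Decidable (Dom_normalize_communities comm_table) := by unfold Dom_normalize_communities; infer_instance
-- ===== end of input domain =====

-- B replaces A's fused online labelling loop by: one statistics pass (first position and multiplicity per
-- value), labels obtained by SORTING the distinct values by first position, sizes read off the multiplicity
-- dict (objective: alternative algorithm, same result). Both Pythons mutate comm_table in place identically;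
-- the theorems are about the RETURN value (the list of community sizes).

-- ===== PORT A =====
-- A's fused loop: state (old_to_new_comms, max_cidx, community_sizes). A writes comm_table[i] only at the
-- index i it has just read, so the values read are the original list elements: folding over the list's
-- elements is exact for the returned community_sizes.
def nc_stepA (st : PySem.Dict Int Int × Int × List Int) (cidx : Int) :
    PySem.Dict Int Int × Int × List Int :=
  match st.1.get? cidx with
  | some new_cidx =>
      (st.1, st.2.1,
        PySem.List.pySetD st.2.2 new_cidx (PySem.List.pyGetD st.2.2 new_cidx 0 + 1))
  | none => (st.1.insert cidx st.2.1, st.2.1 + 1, st.2.2 ++ [(1 : Int)])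

def normalize_communities (comm_table : List Int) : List Int :=
  (comm_table.foldl nc_stepA (PySem.Dict.empty, (0 : Int), ([] : List Int))).2.2

-- ===== PORT B =====
-- statistics pass: 'if c not in first: first[c] = i; cnt[c] = 0' then 'cnt[c] += 1'
def nc_stat (st : PySem.Dict Int Int × PySem.Dict Int Int) (p : Int × Int) :
    PySem.Dict Int Int × PySem.Dict Int Int :=
  let st' := if st.1.contains p.2 then st else (st.1.insert p.2 p.1, st.2.insert p.2 0)
  (st'.1, st'.2.insert p.2 (st'.2.getD p.2 0 + 1))

-- 'sorted(cnt, key=first.get)' iterates cnt's keys; every key of cnt is a key of first, so '.getD c 0' is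
-- exact for the key function. The rank dict and 'comm_table[:] = …' only mutate the argument in place and
-- do not affect the returned value, which this port models.
def normalize_communities_alt (comm_table : List Int) : List Int :=
  let st := (PySem.List.enumerate comm_table).foldl nc_stat (PySem.Dict.empty, PySem.Dict.empty)
  let order := PySem.List.sorted st.2.keys (fun c => st.1.getD c 0)
  order.map (fun c => st.2.getD c 0)

-- ===== PRECONDITION & SPEC =====
def Spec_normalize_communities (comm_table : List Int) (out : List Int) : Prop := out = normalize_communities_alt comm_table
instance (comm_table : List Int) (out : List Int) : Decidable (Spec_normalize_communities comm_table out) := by unfold Spec_normalize_communities; infer_instance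

-- ===== CLAIM (what is proved, stated in full; the proofs are below) =====
def Claim_equal_normalize_communities : Prop := ∀ (comm_table : List Int), Dom_normalize_communities comm_table → Spec_normalize_communities comm_table (normalize_communities comm_table)

-- ===== LEMMAS AND PROOFS =====

-- proof-side description of A's dictionary: folding this step over the list builds exactly the
-- first-occurrence dictionary (it is not part of either port's code, only of the proofs)
def nc_stepD (d : PySem.Dict Int Int) (c : Int) : PySem.Dict Int Int :=
  if d.contains c then d else d.insert c (d.size : Int)

-- first index of c in F (for members of F; proof-side only)
def nc_key (F : List Int) (c : Int) : Nat := (PySem.List.index? F c).getD 0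

lemma nc_ofList_append_singleton (L : List Int) (x : Int) :
    PySem.Set.ofList (L ++ [x]) = PySem.Set.add (PySem.Set.ofList L) x := by
  simp [PySem.Set.ofList_eq_foldl, List.foldl_append]

-- invariants of A's dictionary fold: keys stay Nodup, values lie in [0, size), existing bindings persist,
-- every processed element is bound, size is monotone
lemma nc_dict_inv (l : List Int) (d : PySem.Dict Int Int)
    (hnd : d.keys.Nodup)
    (hv : ∀ k v, d.get? k = some v → 0 ≤ v ∧ v < (d.size : Int)) :
    (l.foldl nc_stepD d).keys.Nodup ∧
    (∀ k v, (l.foldl nc_stepD d).get? k = some v → 0 ≤ v ∧ v < ((l.foldl nc_stepD d).size : Int)) ∧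
    (∀ k v, d.get? k = some v → (l.foldl nc_stepD d).get? k = some v) ∧
    (∀ c ∈ l, ((l.foldl nc_stepD d).get? c).isSome) ∧
    d.size ≤ (l.foldl nc_stepD d).size := by
  induction l generalizing d with
  | nil => exact ⟨hnd, hv, fun _ _ h => h, by simp, le_refl _⟩
  | cons c rest ih =>
    simp only [List.foldl_cons]
    have hd' : (nc_stepD d c).keys.Nodup := by
      unfold nc_stepD; split
      · exact hnd
      · exact PySem.Dict.nodup_keys_insert _ _ _ hnd
    have hsize' : d.size ≤ (nc_stepD d c).size := by
      unfold nc_stepD; split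
      · exact le_refl _
      · rw [PySem.Dict.size_insert]; split <;> omega
    have hmonostep : ∀ k v, d.get? k = some v → (nc_stepD d c).get? k = some v := by
      intro k v hk
      unfold nc_stepD; split
      · exact hk
      · next hc =>
        rw [PySem.Dict.get?_insert_of_ne]
        · exact hk
        · intro hkc; subst hkc
          rw [(PySem.Dict.get?_eq_none_iff_contains d k).mpr (by simpa using hc)] at hk
          simp at hk
    have hv' : ∀ k v, (nc_stepD d c).get? k = some v → 0 ≤ v ∧ v < ((nc_stepD d c).size : Int) := by
      intro k v hk
      by_cases hc : d.contains c
      · rw [show nc_stepD d c = d from by unfold nc_stepD; rw [if_pos hc]] at hk ⊢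
        exact hv k v hk
      · rw [show nc_stepD d c = d.insert c (d.size : Int) from by
            unfold nc_stepD; rw [if_neg hc]] at hk ⊢
        rw [PySem.Dict.size_insert, if_neg hc]
        by_cases hkc : k = c
        · subst hkc
          rw [PySem.Dict.get?_insert_self] at hk
          have : v = (d.size : Int) := by injection hk with h; omega
          push_cast; omega
        · rw [PySem.Dict.get?_insert_of_ne _ _ hkc] at hk
          have := hv k v hk
          push_cast; omega
    obtain ⟨a1, a2, a3, a4, a5⟩ := ih (nc_stepD d c) hd' hv'
    refine ⟨a1, a2, fun k v hk => a3 k v (hmonostep k v hk), ?_, le_trans hsize' a5⟩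
    intro x hx
    rcases List.mem_cons.mp hx with hx | hx
    · subst hx
      have hc : ((nc_stepD d x).get? x).isSome := by
        unfold nc_stepD; split
        · next hcc =>
          rw [PySem.Dict.contains_eq_isSome_get?] at hcc; exact hcc
        · simp [PySem.Dict.get?_insert_self]
      obtain ⟨v, hv0⟩ := Option.isSome_iff_exists.mp hc
      exact Option.isSome_iff_exists.mpr ⟨v, a3 x v hv0⟩
    · exact a4 x hx

-- characterization of A's dictionary fold: it binds each value to its first-occurrence rank
lemma nc_dict_char (l : List Int) (L : List Int) (d : PySem.Dict Int Int)
    (hget : ∀ k, d.get? k = (PySem.List.index? L k).map (fun n => (n : Int)))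
    (hsize : d.size = L.length) :
    (∀ k, (l.foldl nc_stepD d).get? k
        = (PySem.List.index? (PySem.Set.update L l) k).map (fun n => (n : Int))) ∧
    (l.foldl nc_stepD d).size = (PySem.Set.update L l).length := by
  induction l generalizing L d with
  | nil =>
    simp only [List.foldl_nil, PySem.Set.update]
    exact ⟨hget, hsize⟩
  | cons c rest ih =>
    have hupd : PySem.Set.update L (c :: rest) = PySem.Set.update (PySem.Set.add L c) rest := by
      simp [PySem.Set.update]
    rw [hupd]
    simp only [List.foldl_cons]
    by_cases hc : c ∈ L
    · have hcontains : d.contains c = true := by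
        obtain ⟨n, hn⟩ := Option.isSome_iff_exists.mp ((PySem.List.index?_isSome_iff L c).mpr hc)
        rw [PySem.Dict.contains_eq_isSome_get?, hget c, hn]
        simp
      have hstep : nc_stepD d c = d := by unfold nc_stepD; rw [if_pos hcontains]
      have hadd : PySem.Set.add L c = L := by simp [PySem.Set.add, hc]
      rw [hstep, hadd]
      exact ih L d hget hsize
    · have hcontains : d.contains c = false := by
        rw [PySem.Dict.contains_eq_isSome_get?, hget c,
          (PySem.List.index?_eq_none_iff L c).mpr hc]
        rfl
      have hstep : nc_stepD d c = d.insert c (d.size : Int) := by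
        unfold nc_stepD; rw [if_neg (by simp [hcontains])]
      have hadd : PySem.Set.add L c = L ++ [c] := by simp [PySem.Set.add, hc]
      rw [hstep, hadd]
      refine ih (L ++ [c]) _ ?_ ?_
      · intro k
        by_cases hkc : k = c
        · subst hkc
          rw [PySem.Dict.get?_insert_self, PySem.List.index?_append_singleton_self L k hc,
            hsize]
          rfl
        · rw [PySem.Dict.get?_insert_of_ne _ _ hkc, hget k]
          by_cases hkL : k ∈ L
          · rw [PySem.List.index?_append_of_mem [c] hkL]
          · rw [(PySem.List.index?_eq_none_iff L k).mpr hkL,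
              (PySem.List.index?_eq_none_iff (L ++ [c]) k).mpr (by simp [hkL, hkc])]
      · rw [PySem.Dict.size_insert, if_neg (by simp [hcontains])]
        simp [hsize]

-- characterization of B's statistics pass: 'first' binds each value to its first position in the list,
-- 'cnt' binds it to its multiplicity, and cnt's keys are the distinct values in first-occurrence order
lemma nc_stat_inv (l : List Int) (pre : List Int) (f cn : PySem.Dict Int Int)
    (hf : ∀ k, f.get? k = (PySem.List.index? pre k).map (fun n => (n : Int)))
    (hc : ∀ k, cn.get? k = if k ∈ pre then some ((pre.count k : Int)) else none)
    (hk : cn.keys = PySem.Set.ofList pre) :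
    (∀ k, ((PySem.List.enumerate l (pre.length : Int)).foldl nc_stat (f, cn)).1.get? k
        = (PySem.List.index? (pre ++ l) k).map (fun n => (n : Int))) ∧
    (∀ k, ((PySem.List.enumerate l (pre.length : Int)).foldl nc_stat (f, cn)).2.get? k
        = if k ∈ pre ++ l then some (((pre ++ l).count k : Int)) else none) ∧
    ((PySem.List.enumerate l (pre.length : Int)).foldl nc_stat (f, cn)).2.keys
        = PySem.Set.ofList (pre ++ l) := by
  induction l generalizing pre f cn with
  | nil =>
    simp only [PySem.List.enumerate, List.foldl_nil, List.append_nil]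
    exact ⟨hf, hc, hk⟩
  | cons x rest ih =>
    rw [PySem.List.enumerate_cons]
    simp only [List.foldl_cons]
    by_cases hx : x ∈ pre
    · -- seen before: first unchanged, cnt[x] += 1
      have hcon : f.contains x = true := by
        obtain ⟨n, hn⟩ := Option.isSome_iff_exists.mp ((PySem.List.index?_isSome_iff pre x).mpr hx)
        rw [PySem.Dict.contains_eq_isSome_get?, hf x, hn]
        simp
      have hstep : nc_stat (f, cn) ((pre.length : Int), x)
          = (f, cn.insert x (cn.getD x 0 + 1)) := by
        simp [nc_stat, hcon]
      have hgetd : cn.getD x 0 = (pre.count x : Int) :=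
        PySem.Dict.getD_of_get?_eq_some _ 0 (by rw [hc x, if_pos hx])
      have hf' : ∀ k, f.get? k = (PySem.List.index? (pre ++ [x]) k).map (fun n => (n : Int)) := by
        intro k
        by_cases hkp : k ∈ pre
        · rw [hf k, PySem.List.index?_append_of_mem [x] hkp]
        · have hkx : k ≠ x := fun h => hkp (h ▸ hx)
          rw [hf k, (PySem.List.index?_eq_none_iff pre k).mpr hkp,
            (PySem.List.index?_eq_none_iff (pre ++ [x]) k).mpr (by simp [hkp, hkx])]
      have hc' : ∀ k, (cn.insert x (cn.getD x 0 + 1)).get? k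
          = if k ∈ pre ++ [x] then some (((pre ++ [x]).count k : Int)) else none := by
        intro k
        by_cases hkx : k = x
        · subst hkx
          rw [PySem.Dict.get?_insert_self, hgetd, if_pos (by simp [hx])]
          simp [List.count_append]
        · rw [PySem.Dict.get?_insert_of_ne _ _ hkx, hc k]
          by_cases hkp : k ∈ pre
          · rw [if_pos hkp, if_pos (by simp [hkp])]
            have hxk : ¬ (x = k) := fun h => hkx h.symm
            simp [List.count_append, hxk]
          · rw [if_neg hkp, if_neg (by simp [hkp, hkx])]
      have hcontains : cn.contains x = true := by
        rw [PySem.Dict.contains_eq_isSome_get?, hc x, if_pos hx]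
        rfl
      have hk' : (cn.insert x (cn.getD x 0 + 1)).keys = PySem.Set.ofList (pre ++ [x]) := by
        rw [PySem.Dict.keys_insert_of_contains _ _ hcontains, hk,
          nc_ofList_append_singleton]
        have : x ∈ PySem.Set.ofList pre := (PySem.Set.mem_ofList pre x).mpr hx
        simp [PySem.Set.add, this]
      have := ih (pre ++ [x]) f (cn.insert x (cn.getD x 0 + 1)) hf' hc' hk'
      rw [hstep]
      simpa using this
    · -- first occurrence: first[x] = i, cnt[x] = 0, then cnt[x] += 1
      have hcon : f.contains x = false := by
        rw [PySem.Dict.contains_eq_isSome_get?, hf x,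
          (PySem.List.index?_eq_none_iff pre x).mpr hx]
        rfl
      have hstep : nc_stat (f, cn) ((pre.length : Int), x)
          = (f.insert x (pre.length : Int),
             (cn.insert x 0).insert x ((cn.insert x 0).getD x 0 + 1)) := by
        simp [nc_stat, hcon]
      have hgetd : (cn.insert x 0).getD x 0 = 0 :=
        PySem.Dict.getD_of_get?_eq_some _ 0 (PySem.Dict.get?_insert_self _ _ _)
      have hf' : ∀ k, (f.insert x (pre.length : Int)).get? k
          = (PySem.List.index? (pre ++ [x]) k).map (fun n => (n : Int)) := by
        intro k
        by_cases hkx : k = x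
        · subst hkx
          rw [PySem.Dict.get?_insert_self, PySem.List.index?_append_singleton_self pre k hx]
          rfl
        · rw [PySem.Dict.get?_insert_of_ne _ _ hkx, hf k]
          by_cases hkp : k ∈ pre
          · rw [PySem.List.index?_append_of_mem [x] hkp]
          · rw [(PySem.List.index?_eq_none_iff pre k).mpr hkp,
              (PySem.List.index?_eq_none_iff (pre ++ [x]) k).mpr (by simp [hkp, hkx])]
      have hc' : ∀ k, ((cn.insert x 0).insert x ((cn.insert x 0).getD x 0 + 1)).get? k
          = if k ∈ pre ++ [x] then some (((pre ++ [x]).count k : Int)) else none := by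
        intro k
        by_cases hkx : k = x
        · subst hkx
          rw [PySem.Dict.get?_insert_self, hgetd, if_pos (by simp)]
          have : pre.count k = 0 := List.count_eq_zero.mpr hx
          simp [List.count_append, this]
        · rw [PySem.Dict.get?_insert_of_ne _ _ hkx, PySem.Dict.get?_insert_of_ne _ _ hkx, hc k]
          by_cases hkp : k ∈ pre
          · rw [if_pos hkp, if_pos (by simp [hkp])]
            have hxk : ¬ (x = k) := fun h => hkx h.symm
            simp [List.count_append, hxk]
          · rw [if_neg hkp, if_neg (by simp [hkp, hkx])]
      have hcontains : cn.contains x = false := by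
        rw [PySem.Dict.contains_eq_isSome_get?, hc x, if_neg hx]
        rfl
      have hcontains2 : (cn.insert x 0).contains x = true := by
        rw [PySem.Dict.contains_eq_isSome_get?, PySem.Dict.get?_insert_self]
        rfl
      have hk' : ((cn.insert x 0).insert x ((cn.insert x 0).getD x 0 + 1)).keys
          = PySem.Set.ofList (pre ++ [x]) := by
        rw [PySem.Dict.keys_insert_of_contains _ _ hcontains2,
          PySem.Dict.keys_insert_of_not_contains _ _ hcontains, hk,
          nc_ofList_append_singleton]
        have : x ∉ PySem.Set.ofList pre := fun h => hx ((PySem.Set.mem_ofList pre x).mp h)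
        simp [PySem.Set.add, this]
      have := ih (pre ++ [x]) (f.insert x (pre.length : Int))
        ((cn.insert x 0).insert x ((cn.insert x 0).getD x 0 + 1)) hf' hc' hk'
      rw [hstep]
      simpa using this

-- B's sort is the identity on the distinct-values list: first-occurrence order is increasing first index
lemma nc_pairwise (l : List Int) : ∀ (pre s F : List Int), F = pre ++ l →
    (∀ a, a ∈ s ↔ a ∈ pre) →
    s.Pairwise (fun a b => nc_key F a < nc_key F b) →
    (∀ a ∈ s, nc_key F a < pre.length) →
    (PySem.Set.update s l).Pairwise (fun a b => nc_key F a < nc_key F b) := by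
  induction l with
  | nil =>
    intro pre s F _ _ hp _
    simpa [PySem.Set.update] using hp
  | cons x rest ih =>
    intro pre s F hF hmem hp hb
    have hupd : PySem.Set.update s (x :: rest) = PySem.Set.update (PySem.Set.add s x) rest := by
      simp [PySem.Set.update]
    rw [hupd]
    by_cases hx : x ∈ s
    · have hadd : PySem.Set.add s x = s := by simp [PySem.Set.add, hx]
      rw [hadd]
      refine ih (pre ++ [x]) s F (by simp [hF]) ?_ hp ?_
      · intro a
        rw [hmem a]
        constructor
        · intro h; exact List.mem_append.mpr (Or.inl h)
        · intro h
          rcases List.mem_append.mp h with h | h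
          · exact h
          · simp only [List.mem_singleton] at h
            exact h ▸ (hmem x).mp hx
      · intro a ha
        have := hb a ha
        simp only [List.length_append, List.length_singleton]
        omega
    · have hadd : PySem.Set.add s x = s ++ [x] := by simp [PySem.Set.add, hx]
      have hxpre : x ∉ pre := fun h => hx ((hmem x).mpr h)
      have hkey : nc_key F x = pre.length := by
        have hix : PySem.List.index? F x = some pre.length :=
          (PySem.List.index?_eq_some_iff F x pre.length).mpr ⟨pre, rest, by rw [hF], rfl, hxpre⟩
        unfold nc_key
        rw [hix]
        rfl
      rw [hadd]
      refine ih (pre ++ [x]) (s ++ [x]) F (by simp [hF]) ?_ ?_ ?_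
      · intro a; simp [hmem a]
      · rw [List.pairwise_append]
        refine ⟨hp, by simp, ?_⟩
        intro a ha b hb'
        simp only [List.mem_singleton] at hb'
        subst hb'
        rw [hkey]
        exact hb a ha
      · intro a ha
        simp only [List.length_append, List.length_singleton]
        rcases List.mem_append.mp ha with h | h
        · have := hb a h; omega
        · simp only [List.mem_singleton] at h
          subst h; rw [hkey]; omega

lemma nc_ofList_pairwise (xs : List Int) :
    (PySem.Set.ofList xs).Pairwise (fun a b => nc_key xs a < nc_key xs b) := by
  have h := nc_pairwise xs [] [] xs rfl (by simp) (by simp) (by simp)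
  rwa [show PySem.Set.update ([] : List Int) xs = PySem.Set.ofList xs from by
    simp [PySem.Set.update, PySem.Set.ofList_eq_foldl]] at h

-- one increment step of A's sizes list, pointwise: sizes[n] += 1 seen through getD
lemma nc_inc_getD (s : List Int) (n : Int) (h0 : 0 ≤ n) (hn : n.toNat < s.length) (i : Nat) :
    (PySem.List.pySetD s n (PySem.List.pyGetD s n 0 + 1)).getD i 0
      = s.getD i 0 + (if (i : Int) = n then 1 else 0) := by
  obtain ⟨m, rfl⟩ : ∃ m : Nat, n = (m : Int) := ⟨n.toNat, by omega⟩
  have hm : m < s.length := by simpa using hn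
  rw [PySem.List.pySetD_natCast, PySem.List.pyGetD_natCast]
  by_cases him : i = m
  · subst him
    simp [List.getD_eq_getElem?_getD, List.getElem?_set_self hm]
  · simp only [List.getD_eq_getElem?_getD, List.getElem?_set_ne (by omega : m ≠ i)]
    simp [him]

lemma nc_inc_len (s : List Int) (n : Int) (v : Int) (h0 : 0 ≤ n) (hn : n.toNat < s.length) :
    (PySem.List.pySetD s n v).length = s.length := by
  obtain ⟨m, rfl⟩ : ∃ m : Nat, n = (m : Int) := ⟨n.toNat, by omega⟩
  rw [PySem.List.pySetD_natCast]; simp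

-- a list is the range-map of its getD
lemma nc_self_eq_map_range (s : List Int) :
    s = (List.range s.length).map (fun i => s.getD i 0) := by
  apply List.ext_getElem
  · simp
  · intro i h1 h2
    simp [List.getD_eq_getElem?_getD, (by simpa using h2 : i < s.length)]

-- A's fused loop, closed form: with m instantiated to d.size, the returned sizes are the counts of the
-- relabeled elements (through the FINAL dictionary), appended to the incoming sizes
lemma nc_A_main (rest : List Int) (d : PySem.Dict Int Int) (sizes : List Int)
    (hnd : d.keys.Nodup)
    (hv : ∀ k v, d.get? k = some v → 0 ≤ v ∧ v < (d.size : Int))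
    (hlen : sizes.length = d.size) :
    (rest.foldl nc_stepA (d, (d.size : Int), sizes)).2.2
      = (List.range (rest.foldl nc_stepD d).size).map
          (fun i => sizes.getD i 0
            + ((rest.map (fun c => (rest.foldl nc_stepD d).getD c 0)).count (i : Int) : Int)) := by
  induction rest generalizing d sizes with
  | nil =>
    simp only [List.foldl_nil, List.map_nil, List.count_nil]
    rw [← hlen]; simpa using nc_self_eq_map_range sizes
  | cons c rest ih =>
    simp only [List.foldl_cons]
    cases hdc : d.get? c with
    | some n =>
      have hcontains : d.contains c := by
        rw [PySem.Dict.contains_eq_isSome_get?, hdc]; rfl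
      have hstepD : nc_stepD d c = d := by unfold nc_stepD; rw [if_pos hcontains]
      obtain ⟨hn0, hns⟩ := hv c n hdc
      have hnt : n.toNat < sizes.length := by omega
      have hstepA : nc_stepA (d, (d.size : Int), sizes) c
          = (d, (d.size : Int), PySem.List.pySetD sizes n (PySem.List.pyGetD sizes n 0 + 1)) := by
        unfold nc_stepA; simp [hdc]
      rw [hstepA, hstepD,
        ih d _ hnd hv (by rw [nc_inc_len sizes n _ hn0 hnt]; exact hlen)]
      obtain ⟨b1, b2, b3, b4, b5⟩ := nc_dict_inv rest d hnd hv
      have hfinal : (rest.foldl nc_stepD d).getD c 0 = n :=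
        PySem.Dict.getD_of_get?_eq_some _ 0 (b3 c n hdc)
      apply List.map_congr_left
      intro i hi
      rw [nc_inc_getD sizes n hn0 hnt i, List.map_cons, hfinal, List.count_cons]
      by_cases hin : (i : Int) = n <;> simp [hin, beq_iff_eq] <;> omega
    | none =>
      have hcontains : d.contains c = false := by
        simpa using (PySem.Dict.get?_eq_none_iff_contains d c).mp hdc
      have hstepD : nc_stepD d c = d.insert c (d.size : Int) := by
        unfold nc_stepD; rw [if_neg (by simp [hcontains])]
      have hstepA : nc_stepA (d, (d.size : Int), sizes) c
          = (d.insert c (d.size : Int), (d.size : Int) + 1, sizes ++ [(1 : Int)]) := by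
        unfold nc_stepA; simp [hdc]
      have hsize' : (d.insert c (d.size : Int)).size = d.size + 1 := by
        rw [PySem.Dict.size_insert, if_neg (by simp [hcontains])]
      have hnd' : (d.insert c (d.size : Int)).keys.Nodup :=
        PySem.Dict.nodup_keys_insert _ _ _ hnd
      have hv' : ∀ k v, (d.insert c (d.size : Int)).get? k = some v →
          0 ≤ v ∧ v < ((d.insert c (d.size : Int)).size : Int) := by
        intro k v hk
        rw [hsize']
        by_cases hkc : k = c
        · subst hkc
          rw [PySem.Dict.get?_insert_self] at hk
          have : v = (d.size : Int) := by injection hk with h; omega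
          push_cast; omega
        · rw [PySem.Dict.get?_insert_of_ne _ _ hkc] at hk
          have := hv k v hk
          push_cast; omega
      have hsm : ((d.size : Int) + 1) = ((d.insert c (d.size : Int)).size : Int) := by
        rw [hsize']; push_cast; ring
      rw [hstepA, hstepD, hsm,
        ih (d.insert c (d.size : Int)) _ hnd' hv' (by simp [hsize', hlen])]
      obtain ⟨b1, b2, b3, b4, b5⟩ := nc_dict_inv rest (d.insert c (d.size : Int)) hnd' hv'
      have hfinal : (rest.foldl nc_stepD (d.insert c (d.size : Int))).getD c 0 = (d.size : Int) :=
        PySem.Dict.getD_of_get?_eq_some _ 0 (b3 c _ (PySem.Dict.get?_insert_self _ _ _))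
      apply List.map_congr_left
      intro i hi
      rw [List.map_cons, hfinal, List.count_cons]
      have happ : (sizes ++ [(1 : Int)]).getD i 0
          = sizes.getD i 0 + (if (i : Int) = (d.size : Int) then 1 else 0) := by
        by_cases his : i = sizes.length
        · subst his
          rw [List.getD_eq_getElem?_getD, List.getElem?_append_right (le_refl _)]
          simp [List.getD_eq_getElem?_getD, hlen]
        · by_cases hlt : i < sizes.length
          · rw [List.getD_eq_getElem?_getD, List.getElem?_append_left hlt,
              if_neg (by omega : ¬ ((i : Int) = (d.size : Int)))]
            simp [List.getD_eq_getElem?_getD]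
          · have hgt : sizes.length < i := by omega
            rw [List.getD_eq_getElem?_getD,
              List.getElem?_eq_none (by simp; omega : (sizes ++ [(1 : Int)]).length ≤ i),
              if_neg (by omega : ¬ ((i : Int) = (d.size : Int))), List.getD_eq_getElem?_getD,
              List.getElem?_eq_none (by omega : sizes.length ≤ i)]
            simp
      rw [happ]
      simp only [beq_iff_eq]
      push_cast
      split_ifs with h1 h2 <;> omega

-- ===== VERDICT (by name: the statement is the Claim_ definition above) =====
theorem normalize_communities_spec : Claim_equal_normalize_communities := by
  intro xs _
  show normalize_communities xs = normalize_communities_alt xs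
  have hupd0 : PySem.Set.update ([] : List Int) xs = PySem.Set.ofList xs := by
    simp [PySem.Set.update, PySem.Set.ofList_eq_foldl]
  have hemptyget : ∀ k : Int, (PySem.Dict.empty : PySem.Dict Int Int).get? k
      = (PySem.List.index? ([] : List Int) k).map (fun n => (n : Int)) := by
    intro k
    rw [PySem.Dict.get?_empty, (PySem.List.index?_eq_none_iff ([] : List Int) k).mpr (by simp)]
    rfl
  obtain ⟨hDget, hDsize⟩ := nc_dict_char xs [] PySem.Dict.empty hemptyget
    (by simp [PySem.Dict.size_empty])
  rw [hupd0] at hDget hDsize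
  have hstat := nc_stat_inv xs [] PySem.Dict.empty PySem.Dict.empty hemptyget
    (by intro k; simp [PySem.Dict.get?_empty])
    (by simp [PySem.Dict.keys_empty, PySem.Set.ofList_eq_foldl])
  simp only [List.length_nil, Nat.cast_zero, List.nil_append] at hstat
  obtain ⟨hBf, hBc, hBkeys⟩ := hstat
  set st := (PySem.List.enumerate xs).foldl nc_stat (PySem.Dict.empty, PySem.Dict.empty) with hst
  set O := PySem.Set.ofList xs with hO
  -- on the distinct values, B's sort key is the first index in xs
  have hkeyO : ∀ c ∈ O, st.1.getD c 0 = ((nc_key xs c : Nat) : Int) := by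
    intro c hcO
    have hcxs : c ∈ xs := (PySem.Set.mem_ofList xs c).mp hcO
    obtain ⟨n, hn⟩ := Option.isSome_iff_exists.mp ((PySem.List.index?_isSome_iff xs c).mpr hcxs)
    have hsome : st.1.get? c = some ((n : Nat) : Int) := by rw [hBf c, hn]; rfl
    rw [PySem.Dict.getD_of_get?_eq_some _ 0 hsome]
    unfold nc_key
    rw [hn]
    rfl
  have hOple : O.Pairwise (fun a b => st.1.getD a 0 ≤ st.1.getD b 0) := by
    refine (nc_ofList_pairwise xs).imp_of_mem ?_
    intro a b ha hb hab
    rw [hkeyO a ha, hkeyO b hb]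
    exact_mod_cast le_of_lt hab
  have horder : PySem.List.sorted st.2.keys (fun c => st.1.getD c 0) = O := by
    rw [hBkeys]
    exact PySem.List.sorted_eq_self_of_pairwise O _ hOple
  have halt : normalize_communities_alt xs
      = (PySem.List.sorted st.2.keys (fun c => st.1.getD c 0)).map (fun c => st.2.getD c 0) := rfl
  rw [halt, horder]
  have hA := nc_A_main xs PySem.Dict.empty [] PySem.Dict.nodup_keys_empty
    (by intro k v hk; rw [PySem.Dict.get?_empty] at hk; simp at hk)
    (by simp [PySem.Dict.size_empty])
  simp only [PySem.Dict.size_empty, Nat.cast_zero] at hA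
  show (xs.foldl nc_stepA (PySem.Dict.empty, (0 : Int), ([] : List Int))).2.2
      = O.map (fun c => st.2.getD c 0)
  rw [hA, hDsize]
  apply List.ext_getElem
  · simp
  · intro i h1 h2
    have hi : i < O.length := by simpa using h1
    have hOiO : O[i] ∈ O := List.getElem_mem _
    have hOixs : O[i] ∈ xs := (PySem.Set.mem_ofList xs O[i]).mp hOiO
    have hrhs : st.2.getD O[i] 0 = ((xs.count O[i] : Nat) : Int) :=
      PySem.Dict.getD_of_get?_eq_some _ 0 (by rw [hBc O[i], if_pos hOixs])
    have hcnt : ((xs.map (fun c => (xs.foldl nc_stepD PySem.Dict.empty).getD c 0)).count (i : Int))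
        = xs.count O[i] := by
      rw [List.count_eq_countP, List.count_eq_countP, List.countP_map]
      apply List.countP_congr
      intro c hcxs
      obtain ⟨n, hn⟩ := Option.isSome_iff_exists.mp
        ((PySem.List.index?_isSome_iff O c).mpr ((PySem.Set.mem_ofList xs c).mpr hcxs))
      obtain ⟨hnlt, hOn, -⟩ := PySem.List.getElem_of_index?_eq_some hn
      have hgc : (xs.foldl nc_stepD PySem.Dict.empty).getD c 0 = ((n : Nat) : Int) := by
        refine PySem.Dict.getD_of_get?_eq_some _ 0 ?_
        rw [hDget c, hn]
        rfl
      simp only [Function.comp_apply, hgc, beq_iff_eq, Nat.cast_inj]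
      constructor
      · intro h
        subst h
        exact hOn.symm
      · intro h
        exact (PySem.Set.nodup_ofList xs).getElem_inj_iff.mp (hOn.trans h)
    simp only [List.getElem_map, List.getElem_range]
    rw [hcnt, hrhs]
    simp
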